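-- pv_equiv track=rewrite | github.com/MCSteve123/PyEncry | PyEncryAPI.py | encry
-- ===== SOURCE A (Python) =====
-- def encry(plaintext: str, key: int) -> str:  # 加密函数
--     """加密字符串"""
--     if plaintext == '':
--         return ''
--
--     """替换字符"""
--     a = ''
--     for i in plaintext:
--         b = str(ord(i))
--         for i in range(7 - len(b)):
--             b = '0' + b
--         a += b
--
--     """乘以随机密钥"""
--     a = str(int(a) * key)
--
--     """倒置字符"""
--     ciphertext = ''
--     for i in a:
--         ciphertext = i + ciphertext
--
--     """返回密文"""
--     return ciphertext
-- ===== SOURCE B (Python) =====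
-- def encry(plaintext: str, key: int) -> str:
--     """Same ciphertext, but built by accumulating one big integer (no padded
--     digit-string assembly and no int() re-parse)."""
--     if plaintext == '':
--         return ''
--     n = 0
--     for c in plaintext:
--         n = n * 10_000_000 + ord(c)
--     return ''.join(reversed(str(n * key)))
-- ===== Notes on version B (the rewrite author's own statement) =====
-- stated objective: simpler
-- what changed: Replaces A's padded-decimal-string assembly (per-char 7-digit zero-padding loop, string concatenation, then int() re-parse) by a single integer accumulator n = n*10_000_000 + ord(c), reversing str(n*key) directly.
import Mathlib
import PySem

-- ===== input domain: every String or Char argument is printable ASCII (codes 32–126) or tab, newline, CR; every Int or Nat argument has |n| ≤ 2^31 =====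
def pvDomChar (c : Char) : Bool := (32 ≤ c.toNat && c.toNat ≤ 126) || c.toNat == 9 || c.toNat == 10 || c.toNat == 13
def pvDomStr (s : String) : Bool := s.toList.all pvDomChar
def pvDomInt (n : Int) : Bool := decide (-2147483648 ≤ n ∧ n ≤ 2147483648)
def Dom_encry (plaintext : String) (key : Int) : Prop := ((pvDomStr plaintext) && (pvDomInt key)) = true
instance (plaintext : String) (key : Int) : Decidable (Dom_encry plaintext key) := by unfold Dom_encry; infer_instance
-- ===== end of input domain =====

-- B replaces A's padded-decimal-string assembly and int() re-parse by one integer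
-- accumulator (n = n*10^7 + ord(c)), reversing str(n*key); same return value (no side effects).

-- ===== PORT A =====
-- literal transliteration of A (strings handled on the List Char side);
-- the `none` branch of the int() parse is unreachable (a is nonempty and all digits, proved below)
def encry (plaintext : String) (key : Int) : String :=
  if plaintext == "" then ""
  else
    let a : List Char := plaintext.toList.foldl (fun a i =>
      let b := PySem.Int.toChars ((i.toNat : Int))
      let b := (PySem.List.pyRange 0 (7 - (b.length : Int)) 1).foldl (fun b _ => '0' :: b) b
      a ++ b) []
    match PySem.Int.ofChars? a with
    | none => ""
    | some v =>
      let a2 := PySem.Int.toChars (v * key)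
      let ciphertext := a2.foldl (fun ciphertext i => i :: ciphertext) ([] : List Char)
      String.ofList ciphertext

-- ===== PORT B =====
def encry_alt (plaintext : String) (key : Int) : String :=
  if plaintext == "" then ""
  else
    let n : Int := plaintext.toList.foldl (fun n c => n * 10000000 + (c.toNat : Int)) 0
    String.ofList (PySem.Int.toChars (n * key)).reverse

-- ===== PRECONDITION & SPEC =====
def Spec_encry (plaintext : String) (key : Int) (out : String) : Prop := out = encry_alt plaintext key
instance (plaintext : String) (key : Int) (out : String) : Decidable (Spec_encry plaintext key out) := by unfold Spec_encry; infer_instance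

-- ===== CLAIM (what is proved, stated in full; the proofs are below) =====
def Claim_equal_encry : Prop := ∀ (plaintext : String) (key : Int), Dom_encry plaintext key → Spec_encry plaintext key (encry plaintext key)

-- ===== LEMMAS AND PROOFS =====

-- decimal value of a digit string, Python-style left fold (acc carries the prefix value)
def pvVal (acc : Nat) (ds : List Char) : Nat :=
  ds.foldl (fun a d => a * 10 + (d.toNat - '0'.toNat)) acc

-- symbolic mirrors of PySem's (private) int()-parsing helpers, parameterized by the
-- digit-run worker g; `pv_exists_g` recovers the real worker by unification
def pvDVG (g : List Char → Bool → Nat → Option Nat) : List Char → Option Nat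
  | [] => none
  | cs => g cs false 0

def pvTrim (s : List Char) : List Char :=
  (List.dropWhile PySem.Int.isIntSpace (List.dropWhile PySem.Int.isIntSpace s).reverse).reverse

def pvOfCharsG (g : List Char → Bool → Nat → Option Nat) (s : List Char) : Option Int :=
  have cs := pvTrim s
  match cs with
  | '-' :: ds => Option.map (fun n => -n) (do let a ← pvDVG g ds; pure ((a : Nat) : Int))
  | '+' :: ds => Option.map (fun n => n) (do let a ← pvDVG g ds; pure ((a : Nat) : Int))
  | ds => Option.map (fun n => n) (do let a ← pvDVG g ds; pure ((a : Nat) : Int))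

theorem pv_exists_g : ∃ g : List Char → Bool → Nat → Option Nat,
    (∀ s, PySem.Int.ofChars? s = pvOfCharsG g s) ∧
    (∀ a acc, g [] a acc = if a = true then some acc else none) ∧
    (∀ c rest a acc, g (c :: rest) a acc =
      if c.isDigit = true then g rest true (acc * 10 + (c.toNat - '0'.toNat))
      else if c = '_' ∧ a = true then
        (match rest with
         | d :: _ => if d.isDigit = true then g rest false acc else none
         | [] => none)
      else none) :=
  ⟨_, fun _ => rfl, fun _ _ => rfl, fun _ _ _ _ => rfl⟩

theorem pvVal_acc (ds : List Char) : ∀ acc, pvVal acc ds = acc * 10 ^ ds.length + pvVal 0 ds := by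
  induction ds with
  | nil => intro acc; simp [pvVal]
  | cons d ds ih =>
    intro acc
    show pvVal (acc * 10 + (d.toNat - '0'.toNat)) ds = _
    have h2 : pvVal 0 (d :: ds) = (0 * 10 + (d.toNat - '0'.toNat)) * 10 ^ ds.length + pvVal 0 ds := by
      show pvVal (0 * 10 + (d.toNat - '0'.toNat)) ds = _
      exact ih _
    rw [ih, h2]
    simp [List.length_cons, pow_succ]
    ring

theorem pvVal_append (acc : Nat) (xs ys : List Char) :
    pvVal acc (xs ++ ys) = pvVal (pvVal acc xs) ys := by
  simp [pvVal, List.foldl_append]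

theorem pv_digit_cases {c : Char} (hc : c.isDigit = true) :
    c = '0' ∨ c = '1' ∨ c = '2' ∨ c = '3' ∨ c = '4' ∨ c = '5' ∨ c = '6' ∨ c = '7' ∨ c = '8' ∨ c = '9' := by
  obtain ⟨hl, hr⟩ : 48 ≤ c.toNat ∧ c.toNat ≤ 57 := by
    simp [Char.isDigit, decide_eq_true_eq, UInt32.le_iff_toNat_le] at hc
    exact ⟨hc.1, hc.2⟩
  have hof := Char.ofNat_toNat c
  interval_cases h : c.toNat <;> rw [← hof] <;> decide

theorem pv_digit_not_space {c : Char} (hc : c.isDigit = true) :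
    PySem.Int.isIntSpace c = false := by
  rcases pv_digit_cases hc with rfl|rfl|rfl|rfl|rfl|rfl|rfl|rfl|rfl|rfl <;> decide

theorem pv_dropWhile_digits {l : List Char} (hl : ∀ d ∈ l, d.isDigit = true) :
    List.dropWhile PySem.Int.isIntSpace l = l := by
  cases l with
  | nil => rfl
  | cons x xs => simp [pv_digit_not_space (hl x (by simp))]

theorem pv_trim_eq {ds : List Char} (hd : ∀ d ∈ ds, d.isDigit = true) : pvTrim ds = ds := by
  unfold pvTrim
  rw [pv_dropWhile_digits hd, pv_dropWhile_digits (by intro d hdm; exact hd d (List.mem_reverse.mp hdm)),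
    List.reverse_reverse]

-- digit-run worker on an all-digit list: g computes pvVal
theorem pv_g_run (g : List Char → Bool → Nat → Option Nat)
    (hnil : ∀ a acc, g [] a acc = if a = true then some acc else none)
    (hcons : ∀ c rest a acc, g (c :: rest) a acc =
      if c.isDigit = true then g rest true (acc * 10 + (c.toNat - '0'.toNat))
      else if c = '_' ∧ a = true then
        (match rest with
         | d :: _ => if d.isDigit = true then g rest false acc else none
         | [] => none)
      else none) :
    ∀ ds, (∀ d ∈ ds, d.isDigit = true) → ∀ acc, g ds true acc = some (pvVal acc ds) := by
  intro ds
  induction ds with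
  | nil => intro _ acc; rw [hnil]; simp [pvVal]
  | cons d ds ih =>
    intro hd acc
    rw [hcons, if_pos (hd d (by simp))]
    exact ih (fun x hx => hd x (by simp [hx])) _

-- int() on a nonempty all-digit character list returns its decimal value
theorem pv_parse (ds : List Char) (hne : ds ≠ []) (hd : ∀ d ∈ ds, d.isDigit = true) :
    PySem.Int.ofChars? ds = some ((pvVal 0 ds : Nat) : Int) := by
  obtain ⟨g, hF, hnil, hcons⟩ := pv_exists_g
  obtain ⟨c, tl, rfl⟩ : ∃ c tl, ds = c :: tl := by
    cases ds with
    | nil => exact absurd rfl hne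
    | cons c tl => exact ⟨c, tl, rfl⟩
  have ht : pvTrim (c :: tl) = c :: tl := pv_trim_eq hd
  have hc : c.isDigit = true := hd c (by simp)
  have htl : ∀ d ∈ tl, d.isDigit = true := fun d hx => hd d (by simp [hx])
  have hrun : g (c :: tl) false 0 = some (pvVal 0 (c :: tl)) := by
    rw [hcons, if_pos hc]
    exact pv_g_run g hnil hcons tl htl _
  rw [hF]
  rcases pv_digit_cases hc with rfl|rfl|rfl|rfl|rfl|rfl|rfl|rfl|rfl|rfl <;>
    · simp only [pvOfCharsG]
      rw [ht]
      show Option.map (fun n : Int => n) (do let a ← pvDVG g _; pure ((a : Nat) : Int)) = _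
      show Option.map (fun n : Int => n) (do let a ← g _ false 0; pure ((a : Nat) : Int)) = _
      rw [hrun]
      rfl

-- digitChar of a small number is a digit with the right value
theorem pv_digitChar (n : Nat) (h : n < 10) :
    (Nat.digitChar n).isDigit = true ∧ (Nat.digitChar n).toNat - '0'.toNat = n := by
  interval_cases n <;> exact ⟨by decide, by decide⟩

-- Nat.toDigitsCore correctness (enough fuel): appends a nonempty all-digit block of value n
theorem pv_toDigitsCore (f : Nat) : ∀ (n : Nat) (acc : List Char), 0 < f → n < 10 ^ f →
    ∃ ds, Nat.toDigitsCore 10 f n acc = ds ++ acc ∧ ds ≠ [] ∧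
      (∀ c ∈ ds, c.isDigit = true) ∧ pvVal 0 ds = n := by
  induction f with
  | zero => intro n acc h; omega
  | succ f ih =>
    intro n acc _ hn
    rw [Nat.toDigitsCore]
    by_cases h0 : n / 10 = 0
    · rw [if_pos h0]
      refine ⟨[Nat.digitChar (n % 10)], rfl, by simp, ?_, ?_⟩
      · intro c hcm
        simp at hcm
        subst hcm
        exact (pv_digitChar _ (Nat.mod_lt _ (by norm_num))).1
      · have := (pv_digitChar (n % 10) (Nat.mod_lt _ (by norm_num))).2
        have hv : pvVal 0 [Nat.digitChar (n % 10)] = 0 * 10 + ((n % 10).digitChar.toNat - '0'.toNat) := rfl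
        rw [hv, this]
        omega
    · rw [if_neg h0]
      have hf : 0 < f := by
        by_contra hf
        have : f = 0 := by omega
        subst this
        simp at hn
        omega
      have hfuel : n / 10 < 10 ^ f := by
        rw [Nat.div_lt_iff_lt_mul (by norm_num)]
        calc n < 10 ^ (f + 1) := hn
        _ = 10 ^ f * 10 := by ring
      obtain ⟨ds, heq, hne, hdig, hval⟩ := ih (n / 10) (Nat.digitChar (n % 10) :: acc) hf hfuel
      refine ⟨ds ++ [Nat.digitChar (n % 10)], by simp [heq], by simp, ?_, ?_⟩
      · intro c hcm
        rcases List.mem_append.mp hcm with h | h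
        · exact hdig c h
        · simp at h
          subst h
          exact (pv_digitChar _ (Nat.mod_lt _ (by norm_num))).1
      · have := (pv_digitChar (n % 10) (Nat.mod_lt _ (by norm_num))).2
        have hv : pvVal (n / 10) [Nat.digitChar (n % 10)] = n / 10 * 10 + ((n % 10).digitChar.toNat - '0'.toNat) := rfl
        rw [pvVal_append, hval, hv, this]
        omega

theorem pv_toDigits (n : Nat) :
    Nat.toDigits 10 n ≠ [] ∧ (∀ c ∈ Nat.toDigits 10 n, c.isDigit = true) ∧
      pvVal 0 (Nat.toDigits 10 n) = n := by
  obtain ⟨ds, heq, hne, hdig, hval⟩ := pv_toDigitsCore (n + 1) n [] (by omega)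
    (lt_of_lt_of_le (Nat.lt_pow_self (by norm_num)) (Nat.pow_le_pow_right (by norm_num) (by omega)))
  unfold Nat.toDigits
  rw [heq]
  simp_all

-- codepoints are below 10^7, so str(ord(c)) has at most 7 digits
theorem pv_char_lt (c : Char) : c.toNat < 10000000 := by
  have h := c.valid
  unfold UInt32.isValidChar Nat.isValidChar at h
  rcases h with h | ⟨_, h⟩
  · exact lt_trans h (by norm_num)
  · exact lt_trans h (by norm_num)

theorem pv_toDigits_len_le (c : Char) : (Nat.toDigits 10 c.toNat).length ≤ 7 :=
  Nat.toDigits_length 10 c.toNat 7 (by norm_num) (by have := pv_char_lt c; norm_num; omega)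

-- the zero-padding loop prepends replicate-many '0's
theorem pv_pad_foldl (r : List Int) : ∀ b : List Char,
    r.foldl (fun b _ => '0' :: b) b = List.replicate r.length '0' ++ b := by
  induction r with
  | nil => intro b; simp
  | cons x r ih =>
    intro b
    show r.foldl _ ('0' :: b) = _
    rw [ih]
    simp [List.replicate_succ']

theorem pvVal_replicate_zero (z : Nat) : ∀ acc, pvVal acc (List.replicate z '0') = acc * 10 ^ z := by
  induction z with
  | zero => intro acc; simp [pvVal]
  | succ z ih =>
    intro acc
    rw [List.replicate_succ]
    show pvVal (acc * 10 + ('0'.toNat - '0'.toNat)) _ = _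
    rw [ih]
    simp [pow_succ]
    ring

-- A's per-character block: 7-digit zero-padded decimal of the codepoint
def pvBlock (c : Char) : List Char :=
  List.replicate (7 - (Nat.toDigits 10 c.toNat).length) '0' ++ Nat.toDigits 10 c.toNat

theorem pvBlock_spec (c : Char) :
    pvBlock c ≠ [] ∧ (∀ d ∈ pvBlock c, d.isDigit = true) ∧ (pvBlock c).length = 7 ∧
      ∀ acc, pvVal acc (pvBlock c) = acc * 10000000 + c.toNat := by
  obtain ⟨hne, hdig, hval⟩ := pv_toDigits c.toNat
  have hlen := pv_toDigits_len_le c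
  refine ⟨by simp [pvBlock, hne], ?_, ?_, ?_⟩
  · intro d hd
    rcases List.mem_append.mp hd with h | h
    · rw [List.eq_of_mem_replicate h]; decide
    · exact hdig d h
  · simp [pvBlock]
    omega
  · intro acc
    unfold pvBlock
    rw [pvVal_append, pvVal_replicate_zero, pvVal_acc, hval]
    have h7 : 7 - (Nat.toDigits 10 c.toNat).length + (Nat.toDigits 10 c.toNat).length = 7 := by omega
    rw [mul_assoc, ← pow_add, h7]
    norm_num

-- A's inner fold over one character builds exactly pvBlock
theorem pv_step_eq : (fun (a : List Char) (i : Char) =>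
      let b := PySem.Int.toChars ((i.toNat : Int))
      let b := (PySem.List.pyRange 0 (7 - (b.length : Int)) 1).foldl (fun b _ => '0' :: b) b
      a ++ b) = fun a c => a ++ pvBlock c := by
  funext a c
  have htc : PySem.Int.toChars ((c.toNat : Int)) = Nat.toDigits 10 c.toNat := by
    simp [PySem.Int.toChars]
  simp only [htc]
  rw [pv_pad_foldl, PySem.List.length_pyRange_one]
  have hlen := pv_toDigits_len_le c
  have : ((7 : Int) - (Nat.toDigits 10 c.toNat).length - 0).toNat
      = 7 - (Nat.toDigits 10 c.toNat).length := by omega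
  rw [this]
  rfl

-- value of the concatenated blocks = B's integer accumulator (Nat version)
theorem pv_flat_val (cs : List Char) : ∀ acc : Nat,
    pvVal acc (cs.flatMap pvBlock) = cs.foldl (fun n c => n * 10000000 + c.toNat) acc := by
  induction cs with
  | nil => intro acc; simp [pvVal]
  | cons c cs ih =>
    intro acc
    rw [List.flatMap_cons, pvVal_append, (pvBlock_spec c).2.2.2]
    exact ih _

-- B's Int accumulator is the Nat accumulator, cast
theorem pv_int_fold (cs : List Char) : ∀ acc : Nat,
    cs.foldl (fun n c => n * 10000000 + (c.toNat : Int)) (acc : Int)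
      = ((cs.foldl (fun n c => n * 10000000 + c.toNat) acc : Nat) : Int) := by
  induction cs with
  | nil => intro acc; simp
  | cons c cs ih =>
    intro acc
    show cs.foldl _ ((acc : Int) * 10000000 + (c.toNat : Int)) = _
    rw [show ((acc : Int) * 10000000 + (c.toNat : Int)) = ((acc * 10000000 + c.toNat : Nat) : Int) by push_cast; ring]
    rw [ih]
    rfl

theorem pv_rev_foldl (l : List Char) : ∀ acc : List Char,
    l.foldl (fun ct i => i :: ct) acc = l.reverse ++ acc := by
  induction l with
  | nil => intro acc; simp
  | cons x l ih =>
    intro acc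
    show l.foldl _ (x :: acc) = _
    rw [ih]
    simp

-- ===== VERDICT (by name: the statement is the Claim_ definition above) =====
theorem encry_spec : Claim_equal_encry := by
  unfold Claim_equal_encry
  intro plaintext key _
  unfold Spec_encry encry encry_alt
  by_cases hp : plaintext == ""
  · simp [hp]
  · simp only [hp, Bool.false_eq_true, if_false]
    have hne : plaintext.toList ≠ [] := by
      intro h
      exact hp (by simp [String.toList_eq_nil_iff.mp h])
    rw [pv_step_eq, PySem.List.foldl_append_eq_flatMap, List.nil_append]
    have hflat_ne : plaintext.toList.flatMap pvBlock ≠ [] := by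
      cases h : plaintext.toList with
      | nil => exact absurd h hne
      | cons c cs =>
        rw [List.flatMap_cons]
        intro hb
        exact (pvBlock_spec c).1 (List.append_eq_nil_iff.mp hb).1
    have hflat_dig : ∀ d ∈ plaintext.toList.flatMap pvBlock, d.isDigit = true := by
      intro d hd
      obtain ⟨c, _, hdc⟩ := List.mem_flatMap.mp hd
      exact (pvBlock_spec c).2.1 d hdc
    rw [pv_parse _ hflat_ne hflat_dig, pv_flat_val]
    have hfold := pv_int_fold plaintext.toList 0
    simp only [Nat.cast_zero] at hfold
    rw [hfold]
    show String.ofList (List.foldl (fun ciphertext i => i :: ciphertext) []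
        (PySem.Int.toChars (((plaintext.toList.foldl (fun n c => n * 10000000 + c.toNat) 0 : Nat) : Int) * key)))
      = _
    rw [pv_rev_foldl]
    simp
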